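-- pv_equiv track=rewrite | github.com/Eithax/tfg | main.py | compress_history
-- ===== SOURCE A (Python) =====
-- def compress_history(history, step=1, remove_consecutive_duplicates=True):
--     if step <= 1:
--         indices = range(len(history))
--     else:
--         indices = range(0, len(history), step)
--
--     compressed = []
--     last_val = object()  # sentinel
--     for i in indices:
--         val = history[i]
--         if remove_consecutive_duplicates and compressed and compressed[-1]["cost"] == val:
--             continue
--         compressed.append({"iter": i + 1, "cost": val})
--     return compressed
-- ===== SOURCE B (Python) =====
-- def compress_history(history, step=1, remove_consecutive_duplicates=True):
--     eff = step if step > 1 else 1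
--     out = []
--     for i in reversed(range(0, len(history), eff)):
--         if (not remove_consecutive_duplicates) or i == 0 or history[i - eff] != history[i]:
--             out.append({"iter": i + 1, "cost": history[i]})
--     out.reverse()
--     return out
-- ===== Notes on version B (the rewrite author's own statement) =====
-- stated objective: alternative
-- what changed: B replaces A's stateful loop (compare each value with the last appended row's cost) by a stateless look-back predicate directly on history (keep index i iff i == 0 or history[i-eff] != history[i]) and builds the output back-to-front over the reversed index range, reversing once at the end.
import Mathlib
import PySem

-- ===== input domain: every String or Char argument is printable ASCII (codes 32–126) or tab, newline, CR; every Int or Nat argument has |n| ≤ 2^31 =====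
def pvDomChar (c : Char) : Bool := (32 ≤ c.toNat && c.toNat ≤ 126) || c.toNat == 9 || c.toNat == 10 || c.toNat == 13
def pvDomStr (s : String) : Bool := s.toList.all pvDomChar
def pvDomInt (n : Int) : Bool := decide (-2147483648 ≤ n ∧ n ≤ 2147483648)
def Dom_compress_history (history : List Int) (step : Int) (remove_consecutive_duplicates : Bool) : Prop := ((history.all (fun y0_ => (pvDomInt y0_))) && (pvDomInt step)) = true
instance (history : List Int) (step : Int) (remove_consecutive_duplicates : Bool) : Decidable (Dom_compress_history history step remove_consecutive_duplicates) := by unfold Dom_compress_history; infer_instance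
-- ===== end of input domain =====

-- B drops A's loop state: keep/drop is a pure look-back predicate on history (i == 0 or
-- history[i-eff] != history[i]) and the rows are built back-to-front then reversed once.
-- ===== PORT A =====
-- step function of A's loop (faithful: compare last kept row's "cost" to val, else append)
def stepA (rcd : Bool) (hist : List Int) (compressed : List (List (String × Int))) (i : Int) : List (List (String × Int)) :=
  let val := PySem.List.pyGetD hist i 0
  if rcd && !compressed.isEmpty && ((compressed.getLast?.bind (fun d => d.lookup "cost")) == some val) then
    compressed
  else
    compressed ++ [[("iter", i + 1), ("cost", val)]]

def compress_history (history : List Int) (step : Int) (remove_consecutive_duplicates : Bool) : List (List (String × Int)) :=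
  let indices := if step ≤ 1 then PySem.List.pyRange 0 (history.length : Int) 1
                 else PySem.List.pyRange 0 (history.length : Int) step
  indices.foldl (stepA remove_consecutive_duplicates history) []

-- ===== PORT B =====
-- keep index i iff duplicates are kept, or i == 0, or the previous sampled value differs
def keepB (rcd : Bool) (hist : List Int) (eff : Int) (i : Int) : Bool :=
  !rcd || (i == 0) || !(PySem.List.pyGetD hist (i - eff) 0 == PySem.List.pyGetD hist i 0)

def rowB (hist : List Int) (i : Int) : List (String × Int) :=
  [("iter", i + 1), ("cost", PySem.List.pyGetD hist i 0)]

def compress_history_alt (history : List Int) (step : Int) (remove_consecutive_duplicates : Bool) : List (List (String × Int)) :=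
  -- eff = step if step > 1 else 1, inlined
  (((PySem.List.pyRange 0 (history.length : Int) (if step > 1 then step else 1)).reverse).foldl
    (fun acc i => if keepB remove_consecutive_duplicates history (if step > 1 then step else 1) i
                  then acc ++ [rowB history i] else acc) []).reverse

-- ===== PRECONDITION & SPEC =====
def Spec_compress_history (history : List Int) (step : Int) (remove_consecutive_duplicates : Bool) (out : List (List (String × Int))) : Prop := out = compress_history_alt history step remove_consecutive_duplicates
instance (history : List Int) (step : Int) (remove_consecutive_duplicates : Bool) (out : List (List (String × Int))) : Decidable (Spec_compress_history history step remove_consecutive_duplicates out) := by unfold Spec_compress_history; infer_instance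

-- ===== CLAIM =====
def Claim_equal_compress_history : Prop := ∀ (history : List Int) (step : Int) (remove_consecutive_duplicates : Bool), Dom_compress_history history step remove_consecutive_duplicates → Spec_compress_history history step remove_consecutive_duplicates (compress_history history step remove_consecutive_duplicates)

-- ===== LEMMAS AND PROOFS =====

def mkRow (p : Int × Int) : List (String × Int) := [("iter", p.1 + 1), ("cost", p.2)]

-- A's skip-while-equal recursion at the pair level (prev = last kept cost)
def gskip : Option Int → List (Int × Int) → List (Int × Int)
  | _, [] => []
  | prev, p :: l => if prev == some p.2 then gskip prev l else p :: gskip (some p.2) l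

lemma get_cost_mkRow (p : Int × Int) : (mkRow p).lookup "cost" = some p.2 := by
  simp [mkRow, List.lookup]

lemma stepA_false (hist : List Int) (acc : List (List (String × Int))) (i : Int) :
    stepA false hist acc i = acc ++ [mkRow (i, PySem.List.pyGetD hist i 0)] := by
  simp [stepA, mkRow]

lemma foldA_false (hist : List Int) : ∀ (is : List Int) (acc : List (List (String × Int))),
    is.foldl (stepA false hist) acc
      = acc ++ (is.map (fun i => mkRow (i, PySem.List.pyGetD hist i 0))) := by
  intro is
  induction is with
  | nil => intro acc; simp
  | cons i is ih =>
    intro acc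
    rw [List.foldl_cons, stepA_false, ih]
    simp

lemma stepA_true (hist : List Int) (ps : List (Int × Int)) (i : Int) :
    stepA true hist (ps.map mkRow) i
      = if ps.getLast?.map Prod.snd == some (PySem.List.pyGetD hist i 0)
        then ps.map mkRow
        else (ps ++ [(i, PySem.List.pyGetD hist i 0)]).map mkRow := by
  cases hlast : ps.getLast? with
  | none =>
    have hnil : ps = [] := List.getLast?_eq_none_iff.mp hlast
    subst hnil
    simp [stepA, mkRow]
  | some q =>
    have hne : ps ≠ [] := by intro h; subst h; simp at hlast
    have hmap : (ps.map mkRow).getLast? = some (mkRow q) := by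
      rw [List.getLast?_map, hlast]; rfl
    have hnonempty : (ps.map mkRow).isEmpty = false := by
      simp [List.isEmpty_eq_false_iff, hne]
    simp only [stepA, hnonempty, hmap, Option.bind_some, get_cost_mkRow, Option.map_some]
    by_cases hv : q.2 = PySem.List.pyGetD hist i 0
    · simp [hv]
    · simp [hv, mkRow]

lemma foldA_true (hist : List Int) : ∀ (is : List Int) (ps : List (Int × Int)),
    is.foldl (stepA true hist) (ps.map mkRow)
      = (ps ++ gskip (ps.getLast?.map Prod.snd)
            (is.map (fun i => (i, PySem.List.pyGetD hist i 0)))).map mkRow := by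
  intro is
  induction is with
  | nil => intro ps; simp [gskip]
  | cons i is ih =>
    intro ps
    rw [List.foldl_cons, stepA_true]
    by_cases hv : ps.getLast?.map Prod.snd = some (PySem.List.pyGetD hist i 0)
    · rw [if_pos (by simp [hv]), ih]
      rw [List.map_cons, gskip, if_pos (by simp [hv])]
    · rw [if_neg (by simp [hv]), ih]
      have hlast2 : ((ps ++ [(i, PySem.List.pyGetD hist i 0)]).getLast?).map Prod.snd
          = some (PySem.List.pyGetD hist i 0) := by simp
      rw [hlast2, List.map_cons, gskip, if_neg (by simp [hv])]
      simp

-- range with positive step: nil and cons forms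
lemma pyRange_nil_of_le (a b s : Int) (hs : 0 < s) (h : b ≤ a) :
    PySem.List.pyRange a b s = [] := by
  rw [PySem.List.pyRange_of_pos _ _ hs, if_neg (by omega)]
  simp

lemma pyRange_cons_of_pos (a b s : Int) (hs : 0 < s) (h : a < b) :
    PySem.List.pyRange a b s = a :: PySem.List.pyRange (a + s) b s := by
  rw [PySem.List.pyRange_of_pos _ _ hs, PySem.List.pyRange_of_pos _ _ hs, if_pos h]
  have key : (b - a + s - 1) / s = (b - (a + s) + s - 1) / s + 1 := by
    have h1 : b - a + s - 1 = (b - (a + s) + s - 1) + 1 * s := by ring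
    rw [h1, Int.add_mul_ediv_right _ _ (by omega)]
  by_cases h2 : a + s < b
  · rw [if_pos h2]
    have hnn : 0 ≤ (b - (a + s) + s - 1) / s := Int.ediv_nonneg (by omega) (by omega)
    have hcnt : ((b - a + s - 1) / s).toNat = ((b - (a + s) + s - 1) / s).toNat + 1 := by omega
    rw [hcnt, List.range_succ_eq_map, List.map_cons, List.map_map]
    congr 1
    · push_cast; ring
    · apply List.map_congr_left
      intro k _
      simp only [Function.comp_apply]
      push_cast; ring
  · rw [if_neg h2]
    have hz : (b - (a + s) + s - 1) / s = 0 := Int.ediv_eq_zero_of_lt (by omega) (by omega)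
    have hcnt : ((b - a + s - 1) / s).toNat = 1 := by omega
    rw [hcnt]
    simp

-- A's gskip over the sampled pairs = stateless look-back filter (inner indices: a > 0)
lemma gskip_filter (g : Int → Int) (eff n : Int) (heff : 0 < eff) :
    ∀ (fuel : Nat) (a : Int), (n - a).toNat ≤ fuel → 0 < a →
    gskip (some (g (a - eff))) ((PySem.List.pyRange a n eff).map (fun i => (i, g i)))
      = ((PySem.List.pyRange a n eff).filter (fun i => !(g (i - eff) == g i))).map
          (fun i => (i, g i)) := by
  intro fuel
  induction fuel with
  | zero =>
    intro a hf ha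
    rw [pyRange_nil_of_le a n eff heff (by omega)]
    simp [gskip]
  | succ m ih =>
    intro a hf ha
    by_cases hab : a < n
    · rw [pyRange_cons_of_pos a n eff heff hab]
      simp only [List.map_cons, List.filter_cons]
      have hrec := ih (a + eff) (by omega) (by omega)
      have hsh : a + eff - eff = a := by ring
      rw [hsh] at hrec
      by_cases hv : g (a - eff) = g a
      · rw [gskip, if_pos (by simp [hv])]
        have hp : (!(g (a - eff) == g a)) = false := by simp [hv]
        rw [hp, hv, hrec]
        simp
      · rw [gskip, if_neg (by simp [hv])]
        have hp : (!(g (a - eff) == g a)) = true := by simp [hv]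
        rw [hp, hrec]
        simp
    · rw [pyRange_nil_of_le a n eff heff (by omega)]
      simp [gskip]

-- whole-range version, with the i == 0 disjunct absorbing the head
lemma gskip_filter_zero (g : Int → Int) (eff n : Int) (heff : 0 < eff) :
    gskip none ((PySem.List.pyRange 0 n eff).map (fun i => (i, g i)))
      = ((PySem.List.pyRange 0 n eff).filter
            (fun i => (i == 0) || !(g (i - eff) == g i))).map (fun i => (i, g i)) := by
  by_cases h0 : n ≤ 0
  · rw [pyRange_nil_of_le 0 n eff heff h0]
    simp [gskip]
  · rw [pyRange_cons_of_pos 0 n eff heff (by omega)]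
    simp only [List.map_cons, List.filter_cons]
    rw [gskip, if_neg (by simp)]
    have hp : (((0 : Int) == 0) || !(g (0 - eff) == g 0)) = true := by simp
    rw [hp]
    have hzs : (0 : Int) + eff = eff := by ring
    rw [hzs]
    have hrec := gskip_filter g eff n heff (n - eff).toNat eff le_rfl heff
    have hsh : eff - eff = 0 := by ring
    rw [hsh] at hrec
    rw [hrec]
    have hfc : (PySem.List.pyRange eff n eff).filter (fun i => !(g (i - eff) == g i))
        = (PySem.List.pyRange eff n eff).filter (fun i => (i == 0) || !(g (i - eff) == g i)) := by
      apply List.filter_congr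
      intro i hi
      have := (PySem.List.mem_pyRange_iff_of_pos heff i).mp hi
      have hiz : (i == (0 : Int)) = false := by
        simp only [beq_eq_false_iff_ne, ne_eq]
        omega
      rw [hiz]
      simp
    rw [hfc]
    simp

lemma rowB_eq (hist : List Int) (i : Int) :
    rowB hist i = mkRow (i, PySem.List.pyGetD hist i 0) := rfl

-- B unfolded: filter-then-map over the forward range
lemma alt_eq_filter_map (hist : List Int) (step : Int) (rcd : Bool) :
    compress_history_alt hist step rcd
      = ((PySem.List.pyRange 0 (hist.length : Int) (if step > 1 then step else 1)).filter
            (keepB rcd hist (if step > 1 then step else 1))).map (rowB hist) := by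
  unfold compress_history_alt
  rw [PySem.List.foldl_append_if]
  simp

-- ===== VERDICT =====
theorem compress_history_spec : Claim_equal_compress_history := by
  intro history step rcd _
  unfold Spec_compress_history
  rw [alt_eq_filter_map]
  have heffeq : (if step ≤ 1 then (1 : Int) else step) = (if step > 1 then step else 1) := by
    by_cases h : step ≤ 1
    · rw [if_pos h, if_neg (by omega)]
    · rw [if_neg h, if_pos (by omega)]
  set eff : Int := if step > 1 then step else 1 with heff_def
  have heff : 0 < eff := by
    rw [heff_def]; by_cases h : step > 1
    · rw [if_pos h]; omega
    · rw [if_neg h]; omega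
  have hA : compress_history history step rcd
      = (PySem.List.pyRange 0 (history.length : Int) eff).foldl (stepA rcd history) [] := by
    unfold compress_history
    by_cases h : step ≤ 1
    · rw [if_pos h]
      have : eff = 1 := by rw [heff_def, if_neg (by omega)]
      rw [this]
    · rw [if_neg h]
      have : eff = step := by rw [heff_def, if_pos (by omega)]
      rw [this]
  rw [hA]
  cases rcd with
  | false =>
    have hfold := foldA_false history (PySem.List.pyRange 0 (history.length : Int) eff) []
    rw [hfold, List.nil_append]
    have hkeep : ∀ i, keepB false history eff i = true := by
      intro i; simp [keepB]
    rw [List.filter_eq_self.mpr (fun i _ => hkeep i)]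
    apply List.map_congr_left
    intro i _
    rw [rowB_eq]
  | true =>
    have hfold := foldA_true history (PySem.List.pyRange 0 (history.length : Int) eff) []
    simp only [List.map_nil, List.nil_append, List.getLast?_nil, Option.map_none] at hfold
    rw [hfold]
    rw [gskip_filter_zero (fun i => PySem.List.pyGetD history i 0) eff
          (history.length : Int) heff]
    rw [List.map_map]
    have hkeep : keepB true history eff
        = (fun i => (i == (0 : Int)) || !(PySem.List.pyGetD history (i - eff) 0 == PySem.List.pyGetD history i 0)) := by
      funext i; simp [keepB]
    rw [hkeep]
    apply List.map_congr_left
    intro i _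
    rfl
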